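-- pv_equiv track=rewrite | github.com/accuknox/codeassure-cli | sast_verify/agents/runner.py | _validate_evidence_against_windows
-- ===== SOURCE A (Python) =====
-- def _validate_evidence_against_windows(
--     evidence_locations: list[str],
--     windows: list[tuple[str, int, int]],
--     accessed_paths: dict[str, list[tuple[int, int]]],
-- ) -> list[str]:
--     """Filter evidence_locations against known visible code.
--
--     A citation is valid if it falls within:
--     - Any of the provided windows (prompt evidence), OR
--     - Any range in accessed_paths (tool reads)
--
--     windows is a list of (file_path, start_line, end_line) tuples.
--     """
--     validated = []
--     for loc in evidence_locations:
--         if ":" in loc: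
--             file_part, line_str = loc.rsplit(":", 1)
--             try:
--                 cited_line = int(line_str)
--             except ValueError:
--                 file_part = loc
--                 cited_line = None
--         else:
--             file_part = loc
--             cited_line = None
--
--         # Check against prompt evidence windows
--         for w_path, w_start, w_end in windows:
--             if file_part == w_path:
--                 if cited_line is None or w_start <= cited_line <= w_end:
--                     validated.append(loc)
--                     break
--         else:
--             # Not found in prompt windows — check tool reads
--             if file_part in accessed_paths:
--                 ranges = accessed_paths[file_part]
--                 if cited_line is None:
--                     validated.append(loc)
--                 elif not ranges:
--                     validated.append(loc)
--                 elif any(s <= cited_line <= e for s, e in ranges):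
--                     validated.append(loc)
--
--     return validated
-- ===== SOURCE B (Python) =====
-- def _validate_evidence_against_windows(
--     evidence_locations: list[str],
--     windows: list[tuple[str, int, int]],
--     accessed_paths: dict[str, list[tuple[int, int]]],
-- ) -> list[str]:
--     """Inverted loops: group the citations by file once, then scatter marks
--     from each window / accessed entry onto the citations of its own file;
--     finally emit the marked citations in their original order."""
--     by_file: dict[str, list[tuple[int, int | None]]] = {}
--     for i, loc in enumerate(evidence_locations):
--         if ":" in loc:
--             f, _, line_str = loc.rpartition(":")
--             try:
--                 line = int(line_str)
--             except ValueError: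
--                 f, line = loc, None
--         else:
--             f, line = loc, None
--         by_file.setdefault(f, []).append((i, line))
--
--     hits = set()
--     for w_path, w_start, w_end in windows:
--         for i, line in by_file.get(w_path, ()):
--             if line is None or w_start <= line <= w_end:
--                 hits.add(i)
--     for f, ranges in accessed_paths.items():
--         for i, line in by_file.get(f, ()):
--             if line is None or not ranges or any(s <= line <= e for s, e in ranges):
--                 hits.add(i)
--
--     return [loc for i, loc in enumerate(evidence_locations) if i in hits]
-- ===== Notes on version B (the rewrite author's own statement) =====
-- stated objective: faster
-- what changed: B inverts the loops: it groups citations by file into a dict in one pass, then each window / accessed entry scatters marks onto the citations of its own file into an index set, and the marked citations are emitted in original order — instead of A's per-citation rescan of the whole windows list with a two-stage fallback.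
import Mathlib
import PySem

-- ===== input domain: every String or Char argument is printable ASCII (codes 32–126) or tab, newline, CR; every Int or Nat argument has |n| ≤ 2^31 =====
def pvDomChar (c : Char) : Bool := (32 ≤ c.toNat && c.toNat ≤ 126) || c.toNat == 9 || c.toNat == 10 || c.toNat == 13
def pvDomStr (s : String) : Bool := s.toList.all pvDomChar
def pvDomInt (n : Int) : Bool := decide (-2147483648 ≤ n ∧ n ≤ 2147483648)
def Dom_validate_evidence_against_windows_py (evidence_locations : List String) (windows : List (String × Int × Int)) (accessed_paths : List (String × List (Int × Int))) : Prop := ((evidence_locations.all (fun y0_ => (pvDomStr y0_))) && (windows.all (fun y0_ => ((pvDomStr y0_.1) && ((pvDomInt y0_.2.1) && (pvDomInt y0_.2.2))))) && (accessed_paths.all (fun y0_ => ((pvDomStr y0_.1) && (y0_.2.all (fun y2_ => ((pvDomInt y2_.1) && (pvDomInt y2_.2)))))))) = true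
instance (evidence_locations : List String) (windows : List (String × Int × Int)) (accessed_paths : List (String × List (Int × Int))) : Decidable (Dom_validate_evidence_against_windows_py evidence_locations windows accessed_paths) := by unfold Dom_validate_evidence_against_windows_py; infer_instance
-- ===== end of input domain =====

-- B inverts the loops: citations are grouped by file once, then each window /
-- accessed entry scatters marks onto the citations of its own file (objective: faster).

-- ===== PORT A =====
-- shared parse helper (both Pythons parse a location identically: A via rsplit(":",1),
-- B via rpartition(":")): split at the LAST ':' = rfind; exact there, then int() with try/except.
def pvParseA (loc : String) : String × Option Int :=
  if PySem.Str.isIn ":" loc then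
    let i := PySem.Str.rfind loc ":"
    let file_part := PySem.Str.slice loc none (some i)
    let line_str := PySem.Str.slice loc (some (i + 1)) none
    match PySem.Int.ofStr? line_str with
    | some n => (file_part, some n)
    | none => (loc, none)
  else (loc, none)

-- the `for w_path, w_start, w_end in windows: … break / else` scan: true = the loop broke
def pvScanWindows (file_part : String) (cited_line : Option Int) : List (String × Int × Int) → Bool
  | [] => false
  | (w_path, w_start, w_end) :: ws =>
    if file_part == w_path then
      match cited_line with
      | none => true
      | some l => if w_start ≤ l ∧ l ≤ w_end then true else pvScanWindows file_part cited_line ws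
    else pvScanWindows file_part cited_line ws

def validate_evidence_against_windows_py (evidence_locations : List String) (windows : List (String × Int × Int)) (accessed_paths : List (String × List (Int × Int))) : List String :=
  evidence_locations.foldl (fun validated loc =>
    let pr := pvParseA loc
    if pvScanWindows pr.1 pr.2 windows then
      validated ++ [loc]
    else
      match (PySem.Dict.mk accessed_paths).get? pr.1 with
      | none => validated
      | some ranges =>
        match pr.2 with
        | none => validated ++ [loc]
        | some cited_line =>
          if ranges.isEmpty then validated ++ [loc]
          else if ranges.any (fun r => decide (r.1 ≤ cited_line ∧ cited_line ≤ r.2)) then validated ++ [loc]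
          else validated) []

-- ===== PORT B =====
-- by_file.setdefault(f, []).append((i, line)) over enumerate(evidence_locations)
def pvGroup (evidence_locations : List String) : PySem.Dict String (List (Int × Option Int)) :=
  (PySem.List.enumerate evidence_locations).foldl (fun d p =>
    let pr := pvParseA p.2
    d.modify pr.1 [] (· ++ [(p.1, pr.2)])) PySem.Dict.empty

def pvFits (l : Int) (ivs : List (Int × Int)) : Bool :=
  ivs.any (fun r => decide (r.1 ≤ l ∧ l ≤ r.2))

-- `line is None or w_start <= line <= w_end`
def pvCovW (w : String × Int × Int) (p : Int × Option Int) : Bool :=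
  match p.2 with
  | none => true
  | some l => decide (w.2.1 ≤ l ∧ l ≤ w.2.2)

-- `line is None or not ranges or any(s <= line <= e for s, e in ranges)`
def pvCovA (ranges : List (Int × Int)) (p : Int × Option Int) : Bool :=
  match p.2 with
  | none => true
  | some l => ranges.isEmpty || pvFits l ranges

-- `for f, ranges in accessed_paths.items()` iterates the dict's (distinct) keys;
-- under Pre_ (keys pairwise distinct) that is exactly the association list itself.
def validate_evidence_against_windows_py_alt (evidence_locations : List String) (windows : List (String × Int × Int)) (accessed_paths : List (String × List (Int × Int))) : List String :=
  let g := pvGroup evidence_locations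
  let h1 := windows.foldl (fun s w =>
    (g.getD w.1 []).foldl (fun s p => if pvCovW w p then PySem.Set.add s p.1 else s) s) PySem.Set.empty
  let h2 := accessed_paths.foldl (fun s q =>
    (g.getD q.1 []).foldl (fun s p => if pvCovA q.2 p then PySem.Set.add s p.1 else s) s) h1
  ((PySem.List.enumerate evidence_locations).filter (fun p => PySem.Set.contains h2 p.1)).map (·.2)

-- ===== PRECONDITION & SPEC =====
-- accessed_paths models a Python dict, whose keys are necessarily distinct; Pre_ states
-- that representation invariant (it excludes no Python-reachable input).
def Pre_validate_evidence_against_windows_py (evidence_locations : List String) (windows : List (String × Int × Int)) (accessed_paths : List (String × List (Int × Int))) : Prop :=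
  (accessed_paths.map Prod.fst).Nodup
instance (evidence_locations : List String) (windows : List (String × Int × Int)) (accessed_paths : List (String × List (Int × Int))) : Decidable (Pre_validate_evidence_against_windows_py evidence_locations windows accessed_paths) := by unfold Pre_validate_evidence_against_windows_py; infer_instance

def pvWitness_validate_evidence_against_windows_py : List String × (List (String × Int × Int)) × (List (String × List (Int × Int))) :=
  (["a.py:3", "b.py"], [("a.py", 1, 5)], [("b.py", [(1, 2)])])

def Spec_validate_evidence_against_windows_py (evidence_locations : List String) (windows : List (String × Int × Int)) (accessed_paths : List (String × List (Int × Int))) (out : List String) : Prop := out = validate_evidence_against_windows_py_alt evidence_locations windows accessed_paths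
instance (evidence_locations : List String) (windows : List (String × Int × Int)) (accessed_paths : List (String × List (Int × Int))) (out : List String) : Decidable (Spec_validate_evidence_against_windows_py evidence_locations windows accessed_paths out) := by unfold Spec_validate_evidence_against_windows_py; infer_instance

-- ===== CLAIM (what is proved, stated in full; the proofs are below) =====
def Claim_equal_validate_evidence_against_windows_py : Prop := ∀ (evidence_locations : List String) (windows : List (String × Int × Int)) (accessed_paths : List (String × List (Int × Int))), Dom_validate_evidence_against_windows_py evidence_locations windows accessed_paths → Pre_validate_evidence_against_windows_py evidence_locations windows accessed_paths → Spec_validate_evidence_against_windows_py evidence_locations windows accessed_paths (validate_evidence_against_windows_py evidence_locations windows accessed_paths)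

-- ===== LEMMAS AND PROOFS =====

-- A's combined per-location decision, as a predicate
def pvOkA (windows : List (String × Int × Int)) (accessed_paths : List (String × List (Int × Int))) (loc : String) : Bool :=
  let pr := pvParseA loc
  pvScanWindows pr.1 pr.2 windows ||
    (match (PySem.Dict.mk accessed_paths).get? pr.1 with
     | none => false
     | some ranges => pvCovA ranges (0, pr.2))

lemma scan_eq_any (f : String) (c : Option Int) (ws : List (String × Int × Int)) :
    pvScanWindows f c ws = ws.any (fun w => (f == w.1) && pvCovW w (0, c)) := by
  induction ws with
  | nil => rfl
  | cons w ws ih =>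
    obtain ⟨p, s, e⟩ := w
    simp only [pvScanWindows, List.any_cons, pvCovW]
    by_cases hp : f == p
    · simp only [hp]
      cases c with
      | none => simp
      | some l =>
        by_cases hl : s ≤ l ∧ l ≤ e
        · simp [hl]
        · simp [hl, ih, pvCovW]
    · simp only [Bool.not_eq_true] at hp
      simp [hp, ih, pvCovW]

lemma A_eq_filter (ev : List String) (ws : List (String × Int × Int)) (ap : List (String × List (Int × Int))) :
    validate_evidence_against_windows_py ev ws ap = ev.filter (pvOkA ws ap) := by
  unfold validate_evidence_against_windows_py
  have hbody : (fun (validated : List String) (loc : String) =>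
      let pr := pvParseA loc
      if pvScanWindows pr.1 pr.2 ws then
        validated ++ [loc]
      else
        match (PySem.Dict.mk ap).get? pr.1 with
        | none => validated
        | some ranges =>
          match pr.2 with
          | none => validated ++ [loc]
          | some cited_line =>
            if ranges.isEmpty then validated ++ [loc]
            else if ranges.any (fun r => decide (r.1 ≤ cited_line ∧ cited_line ≤ r.2)) then validated ++ [loc]
            else validated) =
      (fun validated loc => if pvOkA ws ap loc then validated ++ [loc] else validated) := by
    funext validated loc
    unfold pvOkA
    set pr := pvParseA loc
    by_cases hs : pvScanWindows pr.1 pr.2 ws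
    · simp [hs]
    · simp only [Bool.not_eq_true] at hs
      simp only [hs, Bool.false_or, Bool.false_eq_true, if_false]
      cases hg : (PySem.Dict.mk ap).get? pr.1 with
      | none => rfl
      | some ranges =>
        cases hc : pr.2 with
        | none => simp [pvCovA]
        | some l =>
          simp only [pvCovA, pvFits]
          by_cases he : ranges.isEmpty = true
          · rw [if_pos he, if_pos (by rw [he, Bool.true_or])]
          · by_cases ha : (ranges.any fun r => decide (r.1 ≤ l ∧ l ≤ r.2)) = true
            · rw [if_neg he, if_pos ha, if_pos (by rw [ha, Bool.or_true])]
            · rw [if_neg he, if_neg ha, if_neg (fun hor => by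
                rw [Bool.or_eq_true] at hor
                exact hor.elim he ha)]
  rw [hbody]
  exact PySem.List.foldl_append_if_eq_filter _ ev []

-- the grouping dict: the entries of file f, in citation order
lemma group_getD (ev : List String) (f : String) :
    (pvGroup ev).getD f [] =
      ((PySem.List.enumerate ev).filter (fun p => (pvParseA p.2).1 == f)).map
        (fun p => (p.1, (pvParseA p.2).2)) := by
  unfold pvGroup
  have h : (PySem.List.enumerate ev).foldl (fun d p =>
      let pr := pvParseA p.2
      d.modify pr.1 [] (· ++ [(p.1, pr.2)])) PySem.Dict.empty =
    ((PySem.List.enumerate ev).map (fun p => ((pvParseA p.2).1, (p.1, (pvParseA p.2).2)))).foldl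
      (fun d q => d.modify q.1 [] (· ++ [q.2])) PySem.Dict.empty := by
    rw [List.foldl_map]
  rw [h, PySem.Dict.getD_foldl_modify_append]
  simp only [PySem.Dict.getD_empty, List.nil_append, List.filter_map, List.map_map,
    Function.comp_def]

-- membership after one scatter pass (outer list, per-element group, condition)
lemma mem_scatter {β : Type} (outer : List β) (grp : β → List (Int × Option Int))
    (c : β → (Int × Option Int) → Bool) (s : PySem.Set Int) (x : Int) :
    (x ∈ outer.foldl (fun s w => (grp w).foldl
        (fun s p => if c w p then PySem.Set.add s p.1 else s) s) s) ↔
      x ∈ s ∨ ∃ w ∈ outer, ∃ p ∈ grp w, c w p = true ∧ p.1 = x := by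
  have inner : ∀ (w : β) (l : List (Int × Option Int)) (s : PySem.Set Int),
      (x ∈ l.foldl (fun s p => if c w p then PySem.Set.add s p.1 else s) s) ↔
        x ∈ s ∨ ∃ p ∈ l, c w p = true ∧ p.1 = x := by
    intro w l
    induction l with
    | nil => simp
    | cons p l ih =>
      intro s
      simp only [List.foldl_cons]
      by_cases hc : c w p
      · rw [if_pos hc, ih, PySem.Set.mem_add]
        constructor
        · rintro ((h | h) | h)
          · exact Or.inl h
          · exact Or.inr ⟨p, List.mem_cons_self, hc, h.symm⟩
          · obtain ⟨q, hq, hcq, hqx⟩ := h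
            exact Or.inr ⟨q, List.mem_cons_of_mem _ hq, hcq, hqx⟩
        · rintro (h | ⟨q, hq, hcq, hqx⟩)
          · exact Or.inl (Or.inl h)
          · rcases List.mem_cons.mp hq with rfl | hq'
            · exact Or.inl (Or.inr hqx.symm)
            · exact Or.inr ⟨q, hq', hcq, hqx⟩
      · rw [if_neg hc, ih]
        constructor
        · rintro (h | ⟨q, hq, hcq, hqx⟩)
          · exact Or.inl h
          · exact Or.inr ⟨q, List.mem_cons_of_mem _ hq, hcq, hqx⟩
        · rintro (h | ⟨q, hq, hcq, hqx⟩)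
          · exact Or.inl h
          · rcases List.mem_cons.mp hq with rfl | hq'
            · exact absurd hcq (by simpa using hc)
            · exact Or.inr ⟨q, hq', hcq, hqx⟩
  induction outer generalizing s with
  | nil => simp
  | cons w outer ih =>
    simp only [List.foldl_cons]
    refine Iff.trans (ih _) ?_
    rw [inner w (grp w) s]
    constructor
    · rintro ((h | ⟨p, hp, hcp, hpx⟩) | ⟨w', hw', hp⟩)
      · exact Or.inl h
      · exact Or.inr ⟨w, List.mem_cons_self, p, hp, hcp, hpx⟩
      · exact Or.inr ⟨w', List.mem_cons_of_mem _ hw', hp⟩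
    · rintro (h | ⟨w', hw', hp⟩)
      · exact Or.inl (Or.inl h)
      · rcases List.mem_cons.mp hw' with rfl | hw''
        · exact Or.inl (Or.inr hp)
        · exact Or.inr ⟨w', hw'', hp⟩

-- an entry of the group of file f comes from a unique citation index
lemma mem_group_iff (ev : List String) (f : String) (p : Int × Option Int) :
    p ∈ (pvGroup ev).getD f [] ↔
      ∃ (k : Nat) (h : k < ev.length), (pvParseA ev[k]).1 = f ∧ p = ((k : Int), (pvParseA ev[k]).2) := by
  rw [group_getD]
  simp only [List.mem_map, List.mem_filter, PySem.List.mem_enumerate_iff]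
  constructor
  · rintro ⟨q, ⟨⟨k, hk, rfl⟩, hf⟩, rfl⟩
    exact ⟨k, hk, by simpa using hf, by simp⟩
  · rintro ⟨k, hk, hf, rfl⟩
    exact ⟨((k : Int), ev[k]), ⟨⟨k, hk, by simp⟩, by simpa using hf⟩, rfl⟩

-- with distinct keys, the first-match lookup of accessed_paths is plain membership
lemma get?_mk_iff_mem (ap : List (String × List (Int × Int)))
    (hnd : (ap.map Prod.fst).Nodup) (f : String) (r : List (Int × Int)) :
    (PySem.Dict.mk ap).get? f = some r ↔ (f, r) ∈ ap := by
  have hkeys : (PySem.Dict.mk ap).keys.Nodup := hnd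
  rw [PySem.Dict.get?_eq_some_iff_mem_items _ _ _ hkeys]

-- filtering enumerate on the element only, then projecting, is plain filter
lemma filter_enumerate_map (ev : List String) (q : String → Bool) (s : Int) :
    ((PySem.List.enumerate ev s).filter (fun p => q p.2)).map (·.2) = ev.filter q := by
  induction ev generalizing s with
  | nil => rfl
  | cons x ev ih =>
    rw [PySem.List.enumerate_cons]
    by_cases hx : q x
    · simp only [List.filter_cons, hx, if_pos]
      simp only [List.map_cons, ih]
    · simp only [List.filter_cons]
      simp only [hx, Bool.false_eq_true, if_false, ih]

-- the marked index set decides exactly A's per-location predicate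
lemma hits_contains (ev : List String) (ws : List (String × Int × Int))
    (ap : List (String × List (Int × Int))) (hnd : (ap.map Prod.fst).Nodup)
    (k : Nat) (hk : k < ev.length) :
    PySem.Set.contains
      (ap.foldl (fun s q => ((pvGroup ev).getD q.1 []).foldl
          (fun s p => if pvCovA q.2 p then PySem.Set.add s p.1 else s) s)
        (ws.foldl (fun s w => ((pvGroup ev).getD w.1 []).foldl
          (fun s p => if pvCovW w p then PySem.Set.add s p.1 else s) s) PySem.Set.empty))
      (k : Int) = pvOkA ws ap ev[k] := by
  have hmem : ∀ (s : PySem.Set Int) (x : Int), PySem.Set.contains s x = decide (x ∈ s) := by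
    intro s x
    simp [PySem.Set.contains]
  rw [hmem]
  rw [Bool.eq_iff_iff, decide_eq_true_iff]
  rw [mem_scatter, mem_scatter]
  have hgrp : ∀ (f : String) (p : Int × Option Int),
      p ∈ (pvGroup ev).getD f [] ∧ p.1 = (k : Int) ↔
        ((pvParseA ev[k]).1 = f ∧ p = ((k : Int), (pvParseA ev[k]).2)) := by
    intro f p
    constructor
    · rintro ⟨hp, hpk⟩
      rw [mem_group_iff] at hp
      obtain ⟨k', hk', hf, rfl⟩ := hp
      simp only at hpk
      have : k' = k := by exact_mod_cast hpk
      subst this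
      exact ⟨hf, rfl⟩
    · rintro ⟨hf, rfl⟩
      refine ⟨(mem_group_iff ev f _).mpr ⟨k, hk, hf, rfl⟩, rfl⟩
  unfold pvOkA
  rw [Bool.or_eq_true, scan_eq_any, List.any_eq_true]
  constructor
  · rintro ((h | ⟨w, hw, p, hp, hcw, hpk⟩) | ⟨q, hq, p, hp, hca, hpk⟩)
    · exact absurd h (by simp [PySem.Set.empty])
    · left
      obtain ⟨hf, rfl⟩ := (hgrp w.1 p).mp ⟨hp, hpk⟩
      refine ⟨w, hw, ?_⟩
      rw [Bool.and_eq_true, beq_iff_eq]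
      refine ⟨hf, ?_⟩
      cases hc : (pvParseA ev[k]).2 with
      | none => simp [pvCovW]
      | some l =>
        simp only [pvCovW, hc] at hcw ⊢
        exact hcw
    · right
      obtain ⟨hf, rfl⟩ := (hgrp q.1 p).mp ⟨hp, hpk⟩
      have : (PySem.Dict.mk ap).get? (pvParseA ev[k]).1 = some q.2 := by
        rw [get?_mk_iff_mem ap hnd]
        rw [hf]
        exact hq
      rw [this]
      cases hc : (pvParseA ev[k]).2 with
      | none => simp [pvCovA]
      | some l =>
        simp only [pvCovA, hc] at hca ⊢
        exact hca
  · rintro (⟨w, hw, hcond⟩ | hacc)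
    · rw [Bool.and_eq_true, beq_iff_eq] at hcond
      obtain ⟨hf, hcov⟩ := hcond
      refine Or.inl (Or.inr ⟨w, hw, ((k : Int), (pvParseA ev[k]).2), ?_⟩)
      have := (hgrp w.1 ((k : Int), (pvParseA ev[k]).2)).mpr ⟨hf, rfl⟩
      refine ⟨this.1, ?_, rfl⟩
      cases hc : (pvParseA ev[k]).2 with
      | none => simp [pvCovW]
      | some l =>
        simp only [pvCovW, hc] at hcov ⊢
        exact hcov
    · cases hg : (PySem.Dict.mk ap).get? (pvParseA ev[k]).1 with
      | none => rw [hg] at hacc; exact absurd hacc (by simp)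
      | some ranges =>
        rw [hg] at hacc
        have hmemq : ((pvParseA ev[k]).1, ranges) ∈ ap := (get?_mk_iff_mem ap hnd _ _).mp hg
        refine Or.inr ⟨((pvParseA ev[k]).1, ranges), hmemq, ((k : Int), (pvParseA ev[k]).2), ?_⟩
        have := (hgrp (pvParseA ev[k]).1 ((k : Int), (pvParseA ev[k]).2)).mpr ⟨rfl, rfl⟩
        refine ⟨this.1, ?_, rfl⟩
        cases hc : (pvParseA ev[k]).2 with
        | none => simp [pvCovA]
        | some l =>
          simp only [pvCovA, hc] at hacc ⊢
          exact hacc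

-- ===== VERDICT (by name: the statement is the Claim_ definition above) =====
theorem validate_evidence_against_windows_py_spec : Claim_equal_validate_evidence_against_windows_py := by
  intro ev ws ap _ hpre
  unfold Spec_validate_evidence_against_windows_py validate_evidence_against_windows_py_alt
  rw [A_eq_filter]
  have hfc : ((PySem.List.enumerate ev).filter (fun p =>
        PySem.Set.contains
          (ap.foldl (fun s q => ((pvGroup ev).getD q.1 []).foldl
              (fun s p => if pvCovA q.2 p then PySem.Set.add s p.1 else s) s)
            (ws.foldl (fun s w => ((pvGroup ev).getD w.1 []).foldl
              (fun s p => if pvCovW w p then PySem.Set.add s p.1 else s) s) PySem.Set.empty))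
          p.1)) =
      ((PySem.List.enumerate ev).filter (fun p => pvOkA ws ap p.2)) := by
    apply List.filter_congr
    intro p hp
    rw [PySem.List.mem_enumerate_iff] at hp
    obtain ⟨k, hk, rfl⟩ := hp
    simpa using hits_contains ev ws ap hpre k hk
  simp only []
  rw [hfc, filter_enumerate_map]
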